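-- pv_equiv track=rewrite | github.com/daniel-reich/ubiquitous-fiesta | SKorutJdWGBzXJDRt_10.py | greet_people
-- ===== SOURCE A (Python) =====
-- def greet_people(names):
--   res=""
--   if len(names)==1:
--     res+="Hello "+names[0]
--   else:
--     for i in range(len(names)):
--       if i!=len(names)-1:
--         res=res+"Hello "+names[i]+", "
--       else:
--         res=res+"Hello "+names[i]
--   return res
-- ===== SOURCE B (Python) =====
-- def greet_people(names):
--   return ', '.join('Hello ' + name for name in names)
-- ===== Notes on version B (the rewrite author's own statement) =====
-- stated objective: simpler
-- what changed: Replaces the single-name special case and the indexed loop with a per-element i != len-1 separator branch by one declarative pass: map each name to its 'Hello ' fragment and let ', '.join place the separators.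
import Mathlib
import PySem

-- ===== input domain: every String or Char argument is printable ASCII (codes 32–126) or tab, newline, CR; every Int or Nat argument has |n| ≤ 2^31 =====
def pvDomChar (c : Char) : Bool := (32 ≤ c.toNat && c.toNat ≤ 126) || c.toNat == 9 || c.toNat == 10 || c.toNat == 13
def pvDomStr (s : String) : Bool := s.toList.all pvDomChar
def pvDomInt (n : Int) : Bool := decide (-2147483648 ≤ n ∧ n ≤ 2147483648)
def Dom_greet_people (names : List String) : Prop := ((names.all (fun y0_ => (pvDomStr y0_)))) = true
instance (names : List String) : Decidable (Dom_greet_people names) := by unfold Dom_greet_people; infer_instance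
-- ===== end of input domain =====

-- B replaces A's single-name special case and indexed loop with a separator branch
-- by a single join over the mapped greeting fragments (objective: simpler).

-- ===== PORT A =====
def greet_people (names : List String) : String :=
  let res := ""
  if names.length = 1 then
    res ++ "Hello " ++ PySem.List.pyGetD names 0 ""
  else
    (PySem.List.pyRange 0 names.length 1).foldl
      (fun res i =>
        if i ≠ (names.length : Int) - 1 then
          res ++ "Hello " ++ PySem.List.pyGetD names i "" ++ ", "
        else
          res ++ "Hello " ++ PySem.List.pyGetD names i "") res

-- ===== PORT B =====
def greet_people_alt (names : List String) : String :=
  PySem.Str.join ", " (names.map (fun name => "Hello " ++ name))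

-- ===== PRECONDITION & SPEC =====
def Spec_greet_people (names : List String) (out : String) : Prop := out = greet_people_alt names
instance (names : List String) (out : String) : Decidable (Spec_greet_people names out) := by unfold Spec_greet_people; infer_instance

-- ===== CLAIM (what is proved, stated in full; the proofs are below) =====
def Claim_equal_greet_people : Prop := ∀ (names : List String), Dom_greet_people names → Spec_greet_people names (greet_people names)

-- ===== LEMMAS AND PROOFS =====

-- proof-only: the character list of the greeting of a nonempty-or-empty suffix
def pvG : List String → List Char
  | [] => []
  | [x] => ("Hello " ++ x).toList
  | x :: y :: rest => ("Hello " ++ x).toList ++ (", ").toList ++ pvG (y :: rest)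

lemma pvG_join (xs : List String) :
    (PySem.Str.join ", " (xs.map (fun name => "Hello " ++ name))).toList = pvG xs := by
  rw [PySem.Str.toList_join]
  induction xs with
  | nil => simp [PySem.Chars.join_nil, pvG]
  | cons x tl ih =>
    cases tl with
    | nil => simp [PySem.Chars.join_singleton, pvG]
    | cons y rest =>
      simp only [List.map_cons] at ih ⊢
      rw [PySem.Chars.join_cons_cons, ih]
      simp [pvG]

lemma pvA_loop (xs : List String) (a : Nat) (acc : String) (ha : a ≤ xs.length) :
    ((PySem.List.pyRange a xs.length 1).foldl
      (fun res i =>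
        if i ≠ (xs.length : Int) - 1 then
          res ++ "Hello " ++ PySem.List.pyGetD xs i "" ++ ", "
        else
          res ++ "Hello " ++ PySem.List.pyGetD xs i "") acc).toList
    = acc.toList ++ pvG (xs.drop a) := by
  induction h : xs.length - a generalizing a acc with
  | zero =>
    have hae : a = xs.length := by omega
    rw [PySem.List.pyRange_one_eq_nil (by exact_mod_cast Nat.le_of_eq hae.symm)]
    simp [hae, pvG]
  | succ n ih =>
    have hlt : (a : Int) < xs.length := by exact_mod_cast (by omega : a < xs.length)
    rw [PySem.List.pyRange_one_cons hlt]
    have hget : PySem.List.pyGetD xs (a : Int) "" = xs[a]'(by omega) := by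
      rw [PySem.List.pyGetD_eq_getElem xs "" (by positivity) hlt]; simp
    have hdrop : xs.drop a = xs[a]'(by omega) :: xs.drop (a + 1) :=
      List.drop_eq_getElem_cons (by omega)
    by_cases hlast : (a : Int) = (xs.length : Int) - 1
    · -- a is the last index: else branch, remaining range is empty
      have ha1 : a + 1 = xs.length := by omega
      rw [List.foldl_cons, if_neg (not_not_intro hlast)]
      rw [show ((a : Int) + 1) = (xs.length : Int) by omega,
        PySem.List.pyRange_one_eq_nil (le_refl _)]
      have hd1 : xs.drop (a + 1) = [] := by simp [ha1]
      simp [hget, hdrop, hd1, pvG]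
    · -- not last: then branch, recurse
      rw [List.foldl_cons, if_pos hlast]
      rw [show ((a : Int) + 1) = ((a + 1 : Nat) : Int) by push_cast; ring]
      rw [ih (a + 1) _ (by omega) (by omega)]
      have hd2 : xs.drop (a + 1) ≠ [] := by
        simp only [ne_eq, List.drop_eq_nil_iff]; omega
      obtain ⟨y, rest, hyr⟩ := List.exists_cons_of_ne_nil hd2
      rw [hdrop, hyr]
      simp [hget, pvG]

lemma toList_eq (names : List String) :
    (greet_people names).toList = (greet_people_alt names).toList := by
  rw [greet_people_alt.eq_def, pvG_join]
  by_cases h1 : names.length = 1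
  · obtain ⟨x, hx⟩ : ∃ x, names = [x] := by
      cases names with
      | nil => simp at h1
      | cons a tl => cases tl with
        | nil => exact ⟨a, rfl⟩
        | cons b tl2 => simp at h1
    subst hx
    simp [greet_people, pvG, PySem.List.pyGetD_zero_cons]
  · have h := pvA_loop names 0 "" (Nat.zero_le _)
    rw [greet_people.eq_def]
    simp only [if_neg h1]
    simpa using h

-- ===== VERDICT (by name: the statement is the Claim_ definition above) =====
theorem greet_people_spec : Claim_equal_greet_people := by
  intro names _
  unfold Spec_greet_people
  exact String.toList_inj.mp (toList_eq names)
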